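-- pv_equiv track=rewrite | github.com/diego-mv/lab2_comDig | encoder_hamming.py | calcularFila
-- ===== SOURCE A (Python) =====
-- def calcularFila(palabra, salto, cadenaTemporal=""):
-- 	originalCadenaAuto = palabra
--
-- 	# recortamos la cadena para que empiece en ese elemento
-- 	palabra = palabra[salto-1:]
-- 	# agregamos una varible apoyo para conservar las "coordenadas"
-- 	n = "N"*(salto-1)
-- 	cadenaTemporal += n
--
-- 	n = "N"*salto
-- 	nsalto = salto * 2
-- 	while len(palabra) > 0:
-- 		# tomamos los elementos segun la paridad
-- 		cadenaTemporal += palabra[:salto]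
-- 		# brincamos los elementos segun la paridad
-- 		palabra = palabra[nsalto:]
-- 		# agregamos una varible apoyo para conservar las coordenadas
-- 		cadenaTemporal += n
--
-- 	# truncamos hasta el largo de la cadena con paridad
-- 	cadenaTemporal = cadenaTemporal[:len(originalCadenaAuto)]
-- 	return cadenaTemporal
-- ===== SOURCE B (Python) =====
-- def calcularFila(palabra, salto, cadenaTemporal=""):
-- 	# one pass: keep palabra[i] exactly when the 1-based position block ((i+1)//salto) is odd
-- 	mask = "".join(c if ((i + 1) // salto) % 2 == 1 else "N" for i, c in enumerate(palabra))
-- 	return (cadenaTemporal + mask)[:len(palabra)]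
-- ===== Notes on version B (the rewrite author's own statement) =====
-- stated objective: simpler
-- what changed: Replaces A's block take/skip slicing loop (which repeatedly reslices the string) with a single per-index pass keeping palabra[i] exactly when ((i+1)//salto) is odd, then one prefix-and-truncate; Pre_ excludes salto <= 0 with nonempty palabra, where A loops forever (never returns).
import Mathlib
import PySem

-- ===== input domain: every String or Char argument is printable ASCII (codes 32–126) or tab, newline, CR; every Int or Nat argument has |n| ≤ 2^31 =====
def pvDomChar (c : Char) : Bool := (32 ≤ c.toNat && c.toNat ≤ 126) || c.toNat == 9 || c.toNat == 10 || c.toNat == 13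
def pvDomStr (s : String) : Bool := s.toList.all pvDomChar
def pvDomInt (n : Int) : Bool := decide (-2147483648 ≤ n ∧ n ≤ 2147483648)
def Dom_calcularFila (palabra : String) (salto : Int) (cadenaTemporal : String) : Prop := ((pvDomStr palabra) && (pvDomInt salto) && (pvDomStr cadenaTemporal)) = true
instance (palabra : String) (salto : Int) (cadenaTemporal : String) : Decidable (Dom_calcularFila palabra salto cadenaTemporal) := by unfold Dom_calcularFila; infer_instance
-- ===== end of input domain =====

-- B replaces A's block take/skip slicing loop with one per-index pass using the parity of ((i+1)//salto); objective: simpler.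

-- ===== PORT A =====
-- the 'while len(palabra) > 0' loop; fuel bounds the iterations (inside Pre_ the list shrinks each turn, so fuel = length + 1 is never exhausted)
def calcularFilaLoop : Nat → List Char → Int → Int → List Char → List Char
  | 0, _, _, _, acc => acc
  | fuel+1, palabra, salto, nsalto, acc =>
    if palabra.length > 0 then
      calcularFilaLoop fuel (PySem.List.slice palabra (some nsalto) none) salto nsalto
        ((acc ++ PySem.List.slice palabra none (some salto)) ++ List.replicate salto.toNat 'N')
    else acc

def calcularFila (palabra : String) (salto : Int) (cadenaTemporal : String) : String :=
  let originalCadenaAuto := palabra.toList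
  let p := PySem.List.slice originalCadenaAuto (some (salto - 1)) none
  let ct := cadenaTemporal.toList ++ List.replicate (salto - 1).toNat 'N'
  let res := calcularFilaLoop (p.length + 1) p salto (salto * 2) ct
  String.mk (PySem.List.slice res none (some (originalCadenaAuto.length : Int)))

-- ===== PORT B =====
def calcularFila_alt (palabra : String) (salto : Int) (cadenaTemporal : String) : String :=
  let xs := palabra.toList
  let mask := (PySem.List.enumerate xs 0).map (fun ic =>
    if PySem.Int.mod (PySem.Int.floordiv (ic.1 + 1) salto) 2 == 1 then ic.2 else 'N')
  String.mk (PySem.List.slice (cadenaTemporal.toList ++ mask) none (some (xs.length : Int)))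

-- ===== PRECONDITION & SPEC =====
-- Pre_ excludes salto ≤ 0 with nonempty palabra: there A's while loop never shrinks palabra and A diverges (returns nothing).
def Pre_calcularFila (palabra : String) (salto : Int) (cadenaTemporal : String) : Prop :=
  1 ≤ salto ∨ palabra = ""
instance (palabra : String) (salto : Int) (cadenaTemporal : String) : Decidable (Pre_calcularFila palabra salto cadenaTemporal) := by unfold Pre_calcularFila; infer_instance

def pvWitness_calcularFila : String × Int × String := ("dato1011", 2, "")

def Spec_calcularFila (palabra : String) (salto : Int) (cadenaTemporal : String) (out : String) : Prop := out = calcularFila_alt palabra salto cadenaTemporal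
instance (palabra : String) (salto : Int) (cadenaTemporal : String) (out : String) : Decidable (Spec_calcularFila palabra salto cadenaTemporal out) := by unfold Spec_calcularFila; infer_instance

-- ===== CLAIM (what is proved, stated in full; the proofs are below) =====
def Claim_equal_calcularFila : Prop := ∀ (palabra : String) (salto : Int) (cadenaTemporal : String), Dom_calcularFila palabra salto cadenaTemporal → Pre_calcularFila palabra salto cadenaTemporal → Spec_calcularFila palabra salto cadenaTemporal (calcularFila palabra salto cadenaTemporal)

-- ===== LEMMAS AND PROOFS =====

-- the per-position mask B computes, as a structural recursion over positions (proof helper)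
def maskFrom (s : Nat) : Nat → List Char → List Char
  | _, [] => []
  | j, c :: t => (if ((j+1)/s) % 2 = 1 then c else 'N') :: maskFrom s (j+1) t

theorem maskFrom_length (s : Nat) : ∀ (j : Nat) (p : List Char), (maskFrom s j p).length = p.length := by
  intro j p
  induction p generalizing j with
  | nil => rfl
  | cons c t ih => simp [maskFrom, ih]

theorem maskFrom_append (s : Nat) : ∀ (a b : List Char) (j : Nat),
    maskFrom s j (a ++ b) = maskFrom s j a ++ maskFrom s (j + a.length) b := by
  intro a
  induction a with
  | nil => intro b j; simp [maskFrom]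
  | cons c t ih =>
    intro b j
    simp [maskFrom, ih b (j+1)]
    ring_nf

theorem maskFrom_keep (s : Nat) (t : Nat) : ∀ (p : List Char) (j : Nat),
    (2*t+1)*s ≤ j + 1 → j + p.length < (2*t+2)*s → maskFrom s j p = p := by
  intro p
  induction p with
  | nil => intro j _ _; rfl
  | cons c q ih =>
    intro j h1 h2
    simp only [List.length_cons] at h2
    have hexp : (2*t+1+1)*s = (2*t+2)*s := by ring
    have hd : (j+1)/s = 2*t+1 := Nat.div_eq_of_lt_le h1 (by omega)
    have hmod : (2*t+1) % 2 = 1 := by omega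
    simp only [maskFrom, hd, hmod, reduceIte]
    rw [ih (j+1) (by omega) (by omega)]

theorem maskFrom_drop (s : Nat) (m : Nat) (hm : m % 2 = 0) : ∀ (p : List Char) (j : Nat),
    m*s ≤ j + 1 → j + p.length < (m+1)*s → maskFrom s j p = List.replicate p.length 'N' := by
  intro p
  induction p with
  | nil => intro j _ _; rfl
  | cons c q ih =>
    intro j h1 h2
    simp only [List.length_cons] at h2
    have hd : (j+1)/s = m := Nat.div_eq_of_lt_le h1 (by omega)
    have hmod : ¬ (m % 2 = 1) := by omega
    simp only [maskFrom, hd, hmod, reduceIte, List.length_cons, List.replicate_succ]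
    rw [ih (j+1) (by omega) (by omega)]

theorem loop_acc (fuel : Nat) : ∀ (p acc : List Char) (salto nsalto : Int),
    calcularFilaLoop fuel p salto nsalto acc = acc ++ calcularFilaLoop fuel p salto nsalto [] := by
  induction fuel with
  | zero => intro p acc salto nsalto; simp [calcularFilaLoop]
  | succ n ih =>
    intro p acc salto nsalto
    by_cases h : p.length > 0
    · simp only [calcularFilaLoop, if_pos h]
      rw [ih _ ((acc ++ _) ++ _), ih _ (([] ++ _) ++ _)]
      simp [List.append_assoc]
    · simp [calcularFilaLoop, h]

theorem loop_mask (s : Nat) (hs : 1 ≤ s) : ∀ (fuel : Nat) (p : List Char) (t : Nat),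
    p.length ≤ fuel →
    (calcularFilaLoop fuel p (s : Int) ((s : Int) * 2) []).take p.length
      = maskFrom s ((2*t+1)*s - 1) p := by
  intro fuel
  induction fuel with
  | zero =>
    intro p t h
    have hnil : p = [] := List.eq_nil_of_length_eq_zero (by omega)
    subst hnil; rfl
  | succ n ih =>
    intro p t hfuel
    by_cases hp : p.length > 0
    · have hslice1 : PySem.List.slice p none (some (s : Int)) = p.take s :=
        PySem.List.slice_to_natCast p s
      have hslice2 : PySem.List.slice p (some ((s : Int) * 2)) none = p.drop (2*s) := by
        have h2 : (s : Int) * 2 = ((2*s : Nat) : Int) := by push_cast; ring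
        rw [h2, PySem.List.slice_from_natCast]
      have htoNat : ((s : Int)).toNat = s := Int.toNat_natCast s
      simp only [calcularFilaLoop, if_pos hp, hslice1, hslice2, htoNat, List.nil_append]
      rw [loop_acc]
      set b := (2*t+1)*s - 1 with hb
      have hb0 : 0 < (2*t+1)*s := Nat.mul_pos (by omega) hs
      have hb1 : b + 1 = (2*t+1)*s := by omega
      have e1 : (2*t+2)*s = (2*t+1)*s + s := by ring
      have e2 : (2*t+3)*s = (2*t+1)*s + 2*s := by ring
      have e3 : (2*(t+1)+1)*s = (2*t+1)*s + 2*s := by ring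
      have e4 : (2*t+2+1)*s = (2*t+1)*s + 2*s := by ring
      have hloopnil : calcularFilaLoop n [] (s : Int) ((s : Int) * 2) [] = [] := by
        cases n <;> rfl
      by_cases hA : p.length ≤ s
      · -- whole remainder kept
        have ht : p.take s = p := List.take_of_length_le hA
        have hdrop2 : p.drop (2*s) = [] := List.drop_eq_nil_of_le (by omega)
        rw [ht, hdrop2, hloopnil, List.append_nil, List.take_append, List.take_length,
            Nat.sub_self, List.take_zero, List.append_nil]
        exact (maskFrom_keep s t p b (by omega) (by omega)).symm
      · by_cases hB : p.length ≤ 2*s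
        · -- kept block of size s, then trailing Ns
          have hl1 : (p.take s).length = s := by simp; omega
          have hdrop2 : p.drop (2*s) = [] := List.drop_eq_nil_of_le (by omega)
          rw [hdrop2, hloopnil, List.append_nil, List.take_append,
              List.take_of_length_le (by omega : (p.take s).length ≤ p.length),
              List.take_replicate, hl1]
          have hmin : min (p.length - s) s = p.length - s := by omega
          rw [hmin]
          conv_rhs => rw [← List.take_append_drop s p]
          rw [maskFrom_append, hl1]
          congr 1
          · exact (maskFrom_keep s t (p.take s) b (by omega) (by omega)).symm
          · rw [maskFrom_drop s (2*t+2) (by omega) (p.drop s) (b + s) (by omega)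
                (by simp only [List.length_drop]; omega)]
            simp only [List.length_drop]
        · -- full kept block, full N block, recurse on the rest
          push_neg at hB
          have hl1 : (p.take s).length = s := by simp; omega
          have hl2 : ((p.drop s).take s).length = s := by simp; omega
          have hl3 : (p.drop (2*s)).length = p.length - 2*s := by simp
          have hdec : p = p.take s ++ ((p.drop s).take s ++ p.drop (2*s)) := by
            have h2s : p.drop (2*s) = (p.drop s).drop s := by
              rw [List.drop_drop]; congr 1; omega
            rw [h2s, List.take_append_drop, List.take_append_drop]
          have hlen2s : (p.take s ++ List.replicate s 'N').length ≤ p.length := by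
            simp only [List.length_append, List.length_replicate, hl1]; omega
          rw [List.take_append, List.take_of_length_le hlen2s]
          have hsub : p.length - (p.take s ++ List.replicate s 'N').length = p.length - 2*s := by
            simp only [List.length_append, List.length_replicate, hl1]; omega
          rw [hsub]
          have hih := ih (p.drop (2*s)) (t+1) (by rw [hl3]; omega)
          rw [hl3] at hih
          rw [hih]
          conv_rhs => rw [hdec]
          rw [maskFrom_append, maskFrom_append, hl1, hl2]
          rw [List.append_assoc]
          congr 1
          · exact (maskFrom_keep s t (p.take s) b (by omega) (by omega)).symm
          congr 1
          · rw [maskFrom_drop s (2*t+2) (by omega) ((p.drop s).take s) (b + s) (by omega)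
                (by rw [hl2]; omega)]
            rw [hl2]
          · congr 1
            omega
    · have hnil : p = [] := by
        simp only [gt_iff_lt, not_lt, Nat.le_zero] at hp
        exact List.eq_nil_of_length_eq_zero hp
      subst hnil; rfl

-- B's enumerate pass computes maskFrom
theorem alt_mask (s : Nat) (hs : 1 ≤ s) : ∀ (xs : List Char) (j : Nat),
    (PySem.List.enumerate xs (j : Int)).map (fun ic =>
      if PySem.Int.mod (PySem.Int.floordiv (ic.1 + 1) (s : Int)) 2 == 1 then ic.2 else 'N')
    = maskFrom s j xs := by
  intro xs
  induction xs with
  | nil => intro j; simp [PySem.List.enumerate_nil, maskFrom]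
  | cons c t ih =>
    intro j
    rw [PySem.List.enumerate_cons, List.map_cons]
    have h1 : ((j : Int) + 1) = ((j+1 : Nat) : Int) := by push_cast; ring
    have hfd : PySem.Int.floordiv ((j : Int) + 1) (s : Int) = (((j+1)/s : Nat) : Int) := by
      rw [h1]; exact PySem.Int.floordiv_natCast (j+1) s
    have hmod : PySem.Int.mod ((((j+1)/s : Nat)) : Int) 2 = ((((j+1)/s) % 2 : Nat)) := by
      have := PySem.Int.mod_natCast ((j+1)/s) 2
      simpa using this
    have h2 : ((j : Int) + 1) = ((j + 1 : Nat) : Int) := h1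
    simp only [hfd, hmod]
    rw [maskFrom]
    congr 1
    · by_cases h : ((j+1)/s) % 2 = 1
      · rw [if_pos (by simp only [beq_iff_eq]; exact_mod_cast h), if_pos h]
      · rw [if_neg (by simp only [beq_iff_eq]; exact_mod_cast h), if_neg h]
    · rw [← ih (j+1)]
      congr 1

theorem take_prefix_eq (c X Y : List Char) (n : Nat) (h : X.take n = Y.take n) :
    (c ++ X).take n = (c ++ Y).take n := by
  rw [List.take_append, List.take_append]
  congr 1
  have hk : n - c.length ≤ n := Nat.sub_le n c.length
  calc X.take (n - c.length) = (X.take n).take (n - c.length) := by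
        rw [List.take_take, Nat.min_eq_left hk]
    _ = (Y.take n).take (n - c.length) := by rw [h]
    _ = Y.take (n - c.length) := by rw [List.take_take, Nat.min_eq_left hk]

-- ===== VERDICT (by name: the statement is the Claim_ definition above) =====
theorem calcularFila_spec : Claim_equal_calcularFila := by
  intro palabra salto cadenaTemporal _ hpre
  unfold Spec_calcularFila
  simp only [calcularFila, calcularFila_alt]
  rcases hpre with hs | hempty
  · -- salto ≥ 1
    set s := salto.toNat with hsdef
    have hsalto : salto = (s : Int) := by omega
    have hs1 : 1 ≤ s := by omega
    set xs := palabra.toList with hxs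
    set n := xs.length with hn
    set cad := cadenaTemporal.toList with hcad
    have hsub : salto - 1 = ((s - 1 : Nat) : Int) := by omega
    have hslice0 : PySem.List.slice xs (some (salto - 1)) none = xs.drop (s-1) := by
      rw [hsub, PySem.List.slice_from_natCast]
    have htn : (salto - 1).toNat = s - 1 := by omega
    have hmaskB : (PySem.List.enumerate xs 0).map (fun ic =>
        if PySem.Int.mod (PySem.Int.floordiv (ic.1 + 1) salto) 2 == 1 then ic.2 else 'N')
        = maskFrom s 0 xs := by
      rw [hsalto]
      have h0 : ((0 : Nat) : Int) = (0 : Int) := rfl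
      rw [← h0, alt_mask s hs1 xs 0]
    rw [hslice0, htn, hmaskB]
    set p := xs.drop (s-1) with hp
    have hplen : p.length = n - (s-1) := by rw [hp, hn]; simp
    rw [loop_acc]
    rw [PySem.List.slice_to_natCast, PySem.List.slice_to_natCast]
    rw [List.append_assoc]
    congr 1
    apply take_prefix_eq
    -- take n (N^(s-1) ++ loop output) = take n (maskFrom s 0 xs)
    have hmaskn : (maskFrom s 0 xs).take n = maskFrom s 0 xs :=
      List.take_of_length_le (maskFrom_length s 0 xs).le
    rw [hmaskn]
    have hloopm : (calcularFilaLoop (p.length + 1) p salto (salto * 2) []).take p.length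
        = maskFrom s ((2*0+1)*s - 1) p := by
      rw [hsalto]; exact loop_mask s hs1 (p.length + 1) p 0 (by omega)
    simp only [Nat.mul_zero, Nat.zero_add, Nat.one_mul] at hloopm
    rw [List.take_append, List.take_replicate]
    conv_rhs => rw [← List.take_append_drop (s-1) xs, maskFrom_append]
    have hlt : (xs.take (s-1)).length = min (s-1) n := by rw [hn]; simp
    have hk : maskFrom s 0 (xs.take (s-1)) = List.replicate (xs.take (s-1)).length 'N' :=
      maskFrom_drop s 0 (by omega) (xs.take (s-1)) 0 (by omega) (by rw [hlt]; omega)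
    rw [hk, hlt, ← hp]
    by_cases hcase : n ≤ s - 1
    · have hpnil : p = [] := by rw [hp, List.drop_eq_nil_iff, ← hn]; omega
      have hloopnil : calcularFilaLoop (p.length + 1) p salto (salto * 2) [] = [] := by
        rw [hpnil]; rfl
      rw [hloopnil]
      simp only [List.take_nil, List.append_nil, hpnil, maskFrom]
      congr 1
      omega
    · push_neg at hcase
      have h2 : n - (List.replicate (s-1) 'N').length = p.length := by
        simp only [List.length_replicate]; omega
      have hm1 : min n (s-1) = s - 1 := by omega
      have hm2 : (0 : Nat) + min (s-1) n = s - 1 := by omega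
      rw [h2, hloopm, hm1, hm2, Nat.min_eq_left (by omega : s - 1 ≤ n)]
  · -- palabra = "" : both sides truncate to length 0
    subst hempty
    have h0 : ("".toList) = ([] : List Char) := rfl
    simp only [h0, List.length_nil, Nat.cast_zero]
    rw [PySem.List.slice_to _ (le_refl (0:Int)), PySem.List.slice_to _ (le_refl (0:Int))]
    simp
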